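-- pv_equiv track=rewrite | github.com/microsoft/PowerToys | PythonHome/Lib/unittest/util.py | _count_diff_all_purpose
-- ===== SOURCE A (Python) =====
-- from collections import namedtuple, OrderedDict
--
-- _Mismatch = namedtuple('Mismatch', 'actual expected value')
--
-- def _count_diff_all_purpose(actual, expected):
--     'Returns list of (cnt_act, cnt_exp, elem) triples where the counts differ'
--     # elements need not be hashable
--     s, t = list(actual), list(expected)
--     m, n = len(s), len(t)
--     NULL = object()
--     result = []
--     for i, elem in enumerate(s):
--         if elem is NULL:
--             continue
--         cnt_s = cnt_t = 0
--         for j in range(i, m):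
--             if s[j] == elem:
--                 cnt_s += 1
--                 s[j] = NULL
--         for j, other_elem in enumerate(t):
--             if other_elem == elem:
--                 cnt_t += 1
--                 t[j] = NULL
--         if cnt_s != cnt_t:
--             diff = _Mismatch(cnt_s, cnt_t, elem)
--             result.append(diff)
--
--     for i, elem in enumerate(t):
--         if elem is NULL:
--             continue
--         cnt_t = 0
--         for j in range(i, n):
--             if t[j] == elem:
--                 cnt_t += 1
--                 t[j] = NULL
--         diff = _Mismatch(0, cnt_t, elem)
--         result.append(diff)
--     return result
-- ===== SOURCE B (Python) =====
-- from collections import namedtuple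
--
-- _Mismatch = namedtuple('Mismatch', 'actual expected value')
--
-- def _count_diff_all_purpose(actual, expected):
--     'Returns list of (cnt_act, cnt_exp, elem) triples where the counts differ'
--     # No sentinel mutation: keep a list of distinct elements already handled.
--     s, t = list(actual), list(expected)
--     seen = []
--     result = []
--     for elem in s:
--         if any(elem == u for u in seen):
--             continue
--         seen.append(elem)
--         cnt_s = sum(1 for x in s if x == elem)
--         cnt_t = sum(1 for x in t if x == elem)
--         if cnt_s != cnt_t:
--             result.append(_Mismatch(cnt_s, cnt_t, elem))
--     for elem in t:
--         if any(elem == u for u in seen):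
--             continue
--         seen.append(elem)
--         result.append(_Mismatch(0, sum(1 for x in t if x == elem), elem))
--     return result
-- ===== Notes on version B (the rewrite author's own statement) =====
-- stated objective: simpler
-- what changed: Replaces A's destructive NULL-sentinel mutation of both working lists with a pure pass keeping a 'seen' list of distinct elements and counting occurrences by plain sums; no list is mutated.
import Mathlib
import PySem

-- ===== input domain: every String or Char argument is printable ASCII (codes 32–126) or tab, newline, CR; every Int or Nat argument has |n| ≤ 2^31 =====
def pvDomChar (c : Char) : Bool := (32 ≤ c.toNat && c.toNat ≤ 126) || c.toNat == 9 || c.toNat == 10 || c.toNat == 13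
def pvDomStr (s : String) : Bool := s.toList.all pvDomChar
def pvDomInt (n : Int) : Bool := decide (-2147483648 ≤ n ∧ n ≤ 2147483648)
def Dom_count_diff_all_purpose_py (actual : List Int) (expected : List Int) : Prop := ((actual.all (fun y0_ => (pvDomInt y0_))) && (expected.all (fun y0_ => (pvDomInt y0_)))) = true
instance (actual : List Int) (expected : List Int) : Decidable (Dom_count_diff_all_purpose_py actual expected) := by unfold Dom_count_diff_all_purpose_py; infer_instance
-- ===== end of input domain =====

-- B replaces A's NULL-sentinel mutation with a pure 'seen'-list decomposition (objective: simpler).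
-- A mutates its two local list copies only; the caller's arguments are not mutated.

-- ===== PORT A =====
-- A's NULL sentinel written into the list copies is modelled by Option: 'none' is a
-- slot holding the NULL object (which compares unequal to every int), 'some x' a live int.

-- inner loops 'for j in …: if l[j] == elem: cnt += 1; l[j] = NULL' (count and null out)
def pvNullOut (e : Int) : List (Option Int) → Int × List (Option Int)
  | [] => (0, [])
  | x :: xs =>
    let (c, xs') := pvNullOut e xs
    if x = some e then (c + 1, none :: xs') else (c, x :: xs')

theorem pvNullOut_length (e : Int) (l : List (Option Int)) :
    ((pvNullOut e l).2).length = l.length := by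
  induction l with
  | nil => rfl
  | cons x xs ih =>
    simp only [pvNullOut]
    split <;> simp [ih]

-- first 'for i, elem in enumerate(s)' loop; returns the (mutated) t and the result list
def pvLoop1 : List (Option Int) → List (Option Int) → List (Int × Int × Int) →
    List (Option Int) × List (Int × Int × Int)
  | [], t, res => (t, res)
  | none :: rest, t, res => pvLoop1 rest t res          -- 'if elem is NULL: continue'
  | some e :: rest, t, res =>
    let ps := pvNullOut e rest                           -- j from i: s[i] itself matches first
    let cs := ps.1 + 1
    let pt := pvNullOut e t
    pvLoop1 ps.2 pt.2 (if cs ≠ pt.1 then res ++ [(cs, pt.1, e)] else res)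
  termination_by s _ _ => s.length
  decreasing_by all_goals simp [pvNullOut_length]

-- second 'for i, elem in enumerate(t)' loop
def pvLoop2 : List (Option Int) → List (Int × Int × Int) → List (Int × Int × Int)
  | [], res => res
  | none :: rest, res => pvLoop2 rest res
  | some e :: rest, res =>
    let pt := pvNullOut e rest
    pvLoop2 pt.2 (res ++ [(0, pt.1 + 1, e)])
  termination_by t _ => t.length
  decreasing_by all_goals simp [pvNullOut_length]

def count_diff_all_purpose_py (actual : List Int) (expected : List Int) : List (Int × Int × Int) :=
  pvLoop2 (pvLoop1 (actual.map some) (expected.map some) []).1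
          (pvLoop1 (actual.map some) (expected.map some) []).2

-- ===== PORT B =====
-- 'sum(1 for x in l if x == elem)'
def pvSumCount (e : Int) (l : List Int) : Int :=
  l.foldl (fun a x => if x = e then a + 1 else a) 0

-- first loop of B: over s, skipping elements already in 'seen'
def pvAltLoop1 : List Int → List Int → List Int → List Int → List (Int × Int × Int) →
    List Int × List (Int × Int × Int)
  | [], _, _, seen, res => (seen, res)
  | x :: rest, s, t, seen, res =>
    if seen.contains x then pvAltLoop1 rest s t seen res
    else
      let cs := pvSumCount x s
      let ct := pvSumCount x t
      pvAltLoop1 rest s t (seen ++ [x]) (if cs ≠ ct then res ++ [(cs, ct, x)] else res)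

-- second loop of B: over t, skipping elements already seen
def pvAltLoop2 : List Int → List Int → List Int → List (Int × Int × Int) → List (Int × Int × Int)
  | [], _, _, res => res
  | x :: rest, t, seen, res =>
    if seen.contains x then pvAltLoop2 rest t seen res
    else pvAltLoop2 rest t (seen ++ [x]) (res ++ [(0, pvSumCount x t, x)])

def count_diff_all_purpose_py_alt (actual : List Int) (expected : List Int) : List (Int × Int × Int) :=
  pvAltLoop2 expected expected (pvAltLoop1 actual actual expected [] []).1
             (pvAltLoop1 actual actual expected [] []).2

-- ===== PRECONDITION & SPEC =====
def Spec_count_diff_all_purpose_py (actual : List Int) (expected : List Int) (out : List (Int × Int × Int)) : Prop := out = count_diff_all_purpose_py_alt actual expected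
instance (actual : List Int) (expected : List Int) (out : List (Int × Int × Int)) : Decidable (Spec_count_diff_all_purpose_py actual expected out) := by unfold Spec_count_diff_all_purpose_py; infer_instance

-- ===== CLAIM (what is proved, stated in full; the proofs are below) =====
def Claim_equal_count_diff_all_purpose_py : Prop := ∀ (actual : List Int) (expected : List Int), Dom_count_diff_all_purpose_py actual expected → Spec_count_diff_all_purpose_py actual expected (count_diff_all_purpose_py actual expected)

-- ===== LEMMAS AND PROOFS =====

-- 'mask seen' is the relation between B's pure lists and A's mutated lists:
-- an element is the NULL sentinel exactly when its value has already been processed.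
def pvMask (seen : List Int) (x : Int) : Option Int :=
  if seen.contains x then none else some x

theorem pvSumCount_aux (e : Int) (l : List Int) : ∀ a : Int,
    l.foldl (fun a x => if x = e then a + 1 else a) a = a + (l.count e : Int) := by
  induction l with
  | nil => intro a; simp
  | cons x xs ih =>
    intro a
    by_cases h : x = e <;> simp [h, ih] <;> omega

theorem pvSumCount_eq (e : Int) (l : List Int) : pvSumCount e l = (l.count e : Int) := by
  simpa using pvSumCount_aux e l 0

theorem pvNullOut_mask (e : Int) (l : List Int) (seen : List Int)
    (he : e ∉ seen) :
    pvNullOut e (l.map (pvMask seen)) = ((l.count e : Int), l.map (pvMask (seen ++ [e]))) := by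
  induction l with
  | nil => simp [pvNullOut]
  | cons x xs ih =>
    by_cases hx : x ∈ seen
    · have h1 : pvMask seen x = none := by simp [pvMask, hx]
      have h2 : pvMask (seen ++ [e]) x = none := by simp [pvMask, hx]
      have hne : ¬ x = e := fun h => he (h ▸ hx)
      simp only [List.map_cons, pvNullOut, ih, h1, h2, List.count_cons]
      simp [hne]
    · by_cases hxe : x = e
      · subst hxe
        have h1 : pvMask seen x = some x := by simp [pvMask, hx]
        have h2 : pvMask (seen ++ [x]) x = none := by simp [pvMask]
        simp only [List.map_cons, pvNullOut, ih, h1, h2, List.count_cons]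
        simp
      · have h1 : pvMask seen x = some x := by simp [pvMask, hx]
        have h2 : pvMask (seen ++ [e]) x = some x := by simp [pvMask, hx, hxe]
        simp only [List.map_cons, pvNullOut, ih, h1, h2, List.count_cons]
        simp [hxe]

theorem pvLoop1_eq (s t : List Int) : ∀ (rem seen : List Int) (res : List (Int × Int × Int)),
    (∀ y, y ∉ seen → s.count y = rem.count y) →
    pvLoop1 (rem.map (pvMask seen)) (t.map (pvMask seen)) res
      = (t.map (pvMask (pvAltLoop1 rem s t seen res).1), (pvAltLoop1 rem s t seen res).2) := by
  intro rem
  induction rem with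
  | nil => intro seen res _; simp [pvLoop1, pvAltLoop1]
  | cons x rest ih =>
    intro seen res h
    by_cases hx : x ∈ seen
    · have hmask : pvMask seen x = none := by simp [pvMask, hx]
      have hc : seen.contains x = true := by simpa using hx
      simp only [List.map_cons, hmask, pvLoop1, pvAltLoop1, hc, if_true]
      exact ih seen res (fun y hy => by
        have hne : ¬ x = y := fun he => hy (he ▸ hx)
        simpa [List.count_cons, hne] using h y hy)
    · have hmask : pvMask seen x = some x := by simp [pvMask, hx]
      have hc : seen.contains x = false := by simpa using hx
      have hno := pvNullOut_mask x rest seen hx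
      have hnt := pvNullOut_mask x t seen hx
      have hcs : (rest.count x : Int) + 1 = pvSumCount x s := by
        rw [pvSumCount_eq, h x hx]
        simp
      have hct : (t.count x : Int) = pvSumCount x t := (pvSumCount_eq x t).symm
      simp only [List.map_cons, hmask, pvLoop1, pvAltLoop1, hc, Bool.false_eq_true, if_false,
        hno, hnt]
      rw [hcs, hct]
      exact ih (seen ++ [x]) _ (fun y hy => by
        have hy' : y ∉ seen := fun hys => hy (by simp [hys])
        have hne : ¬ x = y := fun he => hy (by simp [he])
        simpa [List.count_cons, hne] using h y hy')

theorem pvLoop2_eq (t : List Int) : ∀ (rem seen : List Int) (res : List (Int × Int × Int)),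
    (∀ y, y ∉ seen → t.count y = rem.count y) →
    pvLoop2 (rem.map (pvMask seen)) res = (pvAltLoop2 rem t seen res) := by
  intro rem
  induction rem with
  | nil => intro seen res _; simp [pvLoop2, pvAltLoop2]
  | cons x rest ih =>
    intro seen res h
    by_cases hx : x ∈ seen
    · have hmask : pvMask seen x = none := by simp [pvMask, hx]
      have hc : seen.contains x = true := by simpa using hx
      simp only [List.map_cons, hmask, pvLoop2, pvAltLoop2, hc, if_true]
      exact ih seen res (fun y hy => by
        have hne : ¬ x = y := fun he => hy (he ▸ hx)
        simpa [List.count_cons, hne] using h y hy)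
    · have hmask : pvMask seen x = some x := by simp [pvMask, hx]
      have hc : seen.contains x = false := by simpa using hx
      have hno := pvNullOut_mask x rest seen hx
      have hct : (rest.count x : Int) + 1 = pvSumCount x t := by
        rw [pvSumCount_eq, h x hx]
        simp
      simp only [List.map_cons, hmask, pvLoop2, pvAltLoop2, hc, Bool.false_eq_true, if_false, hno]
      rw [hct]
      exact ih (seen ++ [x]) _ (fun y hy => by
        have hy' : y ∉ seen := fun hys => hy (by simp [hys])
        have hne : ¬ x = y := fun he => hy (by simp [he])
        simpa [List.count_cons, hne] using h y hy')

-- ===== VERDICT (by name: the statement is the Claim_ definition above) =====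
theorem count_diff_all_purpose_py_spec : Claim_equal_count_diff_all_purpose_py := by
  intro actual expected _
  unfold Spec_count_diff_all_purpose_py count_diff_all_purpose_py count_diff_all_purpose_py_alt
  have hmask0 : ∀ l : List Int, l.map some = l.map (pvMask []) := by
    intro l; simp [pvMask]
  rw [hmask0 actual, hmask0 expected,
    pvLoop1_eq actual expected actual [] [] (fun y _ => rfl)]
  exact pvLoop2_eq expected expected _ _ (fun y _ => rfl)
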